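-- pv_equiv track=rewrite | github.com/raikhovn/flask_app | tests.py | find_mismatch_btw_2_lists
-- ===== SOURCE A (Python) =====
-- from collections import Counter
--
-- def find_mismatch_btw_2_lists(ar1: [str], ar2: [str]) ->[str]:
--     ret = []
--     ar = ar1 + ar2
--
--     cnt = Counter(ar)
--
--     for i in cnt:
--         if cnt[i] == 1:
--             ret.append(i)
--
--     return ret
-- ===== SOURCE B (Python) =====
-- def find_mismatch_btw_2_lists(ar1: [str], ar2: [str]) ->[str]:
--     ar = ar1 + ar2
--     seen = set()
--     dup = set()
--     for x in ar:
--         if x in seen: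
--             dup.add(x)
--         else:
--             seen.add(x)
--     return [x for x in ar if x not in dup]
-- ===== Notes on version B (the rewrite author's own statement) =====
-- stated objective: alternative
-- what changed: Replaces the Counter frequency table and the loop over its keys by a single pass maintaining two sets (seen / duplicated) and a rescan of the concatenated list keeping elements never duplicated; the output is built in list order rather than key order.
import Mathlib
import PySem

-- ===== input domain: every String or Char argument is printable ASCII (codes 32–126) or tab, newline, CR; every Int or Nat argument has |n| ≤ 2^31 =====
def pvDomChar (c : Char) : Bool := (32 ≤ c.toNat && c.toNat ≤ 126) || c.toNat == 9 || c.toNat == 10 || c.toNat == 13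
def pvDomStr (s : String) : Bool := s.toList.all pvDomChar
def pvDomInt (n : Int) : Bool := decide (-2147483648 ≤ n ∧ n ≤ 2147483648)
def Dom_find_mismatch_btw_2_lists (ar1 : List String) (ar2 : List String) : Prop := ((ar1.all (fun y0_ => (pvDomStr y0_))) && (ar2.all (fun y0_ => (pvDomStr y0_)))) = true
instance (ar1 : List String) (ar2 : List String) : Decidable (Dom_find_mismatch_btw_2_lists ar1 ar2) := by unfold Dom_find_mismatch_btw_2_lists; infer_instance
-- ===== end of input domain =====

-- B replaces A's Counter table and loop over its keys by a single pass maintaining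
-- two sets (seen / duplicated) plus a rescan keeping never-duplicated elements; objective: alternative.

-- ===== PORT A =====
def find_mismatch_btw_2_lists (ar1 : List String) (ar2 : List String) : List String :=
  let ar := ar1 ++ ar2
  let cnt := PySem.Dict.counter ar
  cnt.keys.foldl (fun ret i => if cnt.getD i 0 == 1 then ret ++ [i] else ret) []

-- ===== PORT B =====
-- the body of B's 'for x in ar' loop over the state (seen, dup)
def bstep (p : PySem.Set String × PySem.Set String) (x : String) : PySem.Set String × PySem.Set String :=
  if PySem.Set.contains p.1 x then (p.1, PySem.Set.add p.2 x) else (PySem.Set.add p.1 x, p.2)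

def find_mismatch_btw_2_lists_alt (ar1 : List String) (ar2 : List String) : List String :=
  let ar := ar1 ++ ar2
  let sd := ar.foldl bstep (PySem.Set.empty, PySem.Set.empty)
  ar.filter (fun x => !(PySem.Set.contains sd.2 x))

-- ===== PRECONDITION & SPEC =====
def Spec_find_mismatch_btw_2_lists (ar1 : List String) (ar2 : List String) (out : List String) : Prop := out = find_mismatch_btw_2_lists_alt ar1 ar2
instance (ar1 : List String) (ar2 : List String) (out : List String) : Decidable (Spec_find_mismatch_btw_2_lists ar1 ar2 out) := by unfold Spec_find_mismatch_btw_2_lists; infer_instance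

-- ===== CLAIM (what is proved, stated in full; the proofs are below) =====
def Claim_equal_find_mismatch_btw_2_lists : Prop := ∀ (ar1 : List String) (ar2 : List String), Dom_find_mismatch_btw_2_lists ar1 ar2 → Spec_find_mismatch_btw_2_lists ar1 ar2 (find_mismatch_btw_2_lists ar1 ar2)

-- ===== LEMMAS AND PROOFS =====

theorem set_contains_iff (s : PySem.Set String) (x : String) :
    PySem.Set.contains s x = true ↔ x ∈ s := by
  simp [PySem.Set.contains]

-- Filtering by a predicate that only holds for elements occurring at most once in l
-- gives the same result on the deduplicated list as on l itself.
theorem filter_ofList_of_count_le_one {α : Type} [BEq α] [LawfulBEq α]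
    (p : α → Bool) (l : List α) (h : ∀ x, p x = true → l.count x ≤ 1) :
    (PySem.Set.ofList l).filter p = l.filter p := by
  induction l with
  | nil => simp [PySem.Set.ofList]
  | cons a l ih =>
    rw [PySem.Set.ofList_cons]
    have hle : ∀ x, p x = true → l.count x ≤ 1 := by
      intro x hx
      have := h x hx
      rw [List.count_cons] at this
      split at this <;> omega
    by_cases hpa : p a = true
    · have hnotmem : a ∉ l := by
        have := h a hpa
        simp [List.count_cons_self] at this
        exact List.count_eq_zero.mp (by omega)
      have hnd : a ∉ PySem.Set.ofList l := by
        intro hmem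
        exact hnotmem ((PySem.Set.mem_ofList l a).mp hmem)
      have hdisc : (PySem.Set.ofList l).discard a = PySem.Set.ofList l := by
        rw [PySem.Set.discard, List.filter_eq_self]
        intro x hx
        have : ¬ x = a := fun hxa => hnd (hxa ▸ hx)
        simp [this]
      rw [hdisc]
      simp [hpa, ih hle]
    · have hpa' : p a = false := by simpa using hpa
      have hdiscf : ((PySem.Set.ofList l).discard a).filter p
          = (PySem.Set.ofList l).filter p := by
        simp [PySem.Set.discard, List.filter_filter]
        apply List.filter_congr
        intro x hx
        by_cases hxa : x = a
        · subst hxa; simp [hpa']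
        · simp [hxa]
      simp [hpa', hdiscf, ih hle]

-- A equals the canonical 'keep elements of ar whose count in ar is 1'.
theorem portA_eq_canonical (ar1 ar2 : List String) :
    find_mismatch_btw_2_lists ar1 ar2
      = (ar1 ++ ar2).filter (fun x => (ar1 ++ ar2).count x == 1) := by
  unfold find_mismatch_btw_2_lists
  simp only [PySem.List.foldl_append_if_eq_filter, List.nil_append,
    PySem.Dict.keys_counter]
  have hcong : ∀ (l : List String),
      l.filter (fun i => PySem.Dict.getD (PySem.Dict.counter (ar1 ++ ar2)) i 0 == 1)
        = l.filter (fun i => (ar1 ++ ar2).count i == 1) := by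
    intro l
    apply List.filter_congr
    intro x _
    rw [PySem.Dict.getD_counter]
    rw [Bool.eq_iff_iff]
    simp only [beq_iff_eq]
    omega
  rw [hcong]
  exact filter_ofList_of_count_le_one _ _ (by
    intro x hx
    simp only [beq_iff_eq] at hx
    omega)

-- Loop invariant of B's single pass: membership in the two sets after folding.
theorem loop_mem (l : List String) : ∀ (seen dup : PySem.Set String) (x : String),
    (x ∈ (l.foldl bstep (seen, dup)).1 ↔ x ∈ seen ∨ x ∈ l) ∧
    (x ∈ (l.foldl bstep (seen, dup)).2 ↔ x ∈ dup ∨ (x ∈ seen ∧ x ∈ l) ∨ 2 ≤ l.count x) := by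
  induction l with
  | nil => intro seen dup x; simp
  | cons a l ih =>
    intro seen dup x
    rw [List.foldl_cons]
    by_cases ha : PySem.Set.contains seen a = true
    · have hmem : a ∈ seen := (set_contains_iff seen a).mp ha
      rw [show bstep (seen, dup) a = (seen, PySem.Set.add dup a) by simp only [bstep]; rw [if_pos ha]]
      obtain ⟨h1, h2⟩ := ih seen (PySem.Set.add dup a) x
      constructor
      · rw [h1]
        by_cases hx : x = a
        · subst hx; simp [hmem]
        · simp [List.mem_cons, hx]
      · rw [h2, PySem.Set.mem_add]
        by_cases hx : x = a
        · subst hx; simp [hmem, List.count_cons_self]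
        · simp [List.mem_cons, hx, List.count_cons, if_neg (fun (h : a = x) => hx h.symm)]
    · have hmem : a ∉ seen := fun h => ha ((set_contains_iff seen a).mpr h)
      rw [show bstep (seen, dup) a = (PySem.Set.add seen a, dup) by simp only [bstep]; rw [if_neg ha]]
      obtain ⟨h1, h2⟩ := ih (PySem.Set.add seen a) dup x
      constructor
      · rw [h1, PySem.Set.mem_add]
        by_cases hx : x = a
        · subst hx; simp
        · simp [List.mem_cons, hx]
      · rw [h2, PySem.Set.mem_add]
        by_cases hx : x = a
        · subst hx
          have hc : 0 < l.count x ↔ x ∈ l := List.count_pos_iff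
          simp only [List.count_cons_self, List.mem_cons]
          constructor
          · rintro (h | ⟨_, hl⟩ | h)
            · exact Or.inl h
            · exact Or.inr (Or.inr (by have := hc.mpr hl; omega))
            · exact Or.inr (Or.inr (by omega))
          · rintro (h | ⟨hs, _⟩ | h)
            · exact Or.inl h
            · exact absurd hs hmem
            · exact Or.inr (Or.inl ⟨Or.inr trivial, hc.mp (by omega)⟩)
        · simp [List.mem_cons, hx, List.count_cons, if_neg (fun (h : a = x) => hx h.symm)]

-- B equals the same canonical form.
theorem portB_eq_canonical (ar1 ar2 : List String) :
    find_mismatch_btw_2_lists_alt ar1 ar2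
      = (ar1 ++ ar2).filter (fun x => (ar1 ++ ar2).count x == 1) := by
  unfold find_mismatch_btw_2_lists_alt
  apply List.filter_congr
  intro x hx
  have hd := (loop_mem (ar1 ++ ar2) PySem.Set.empty PySem.Set.empty x).2
  have hempty : x ∉ (PySem.Set.empty : PySem.Set String) := by
    simp [PySem.Set.empty]
  have hpos : 0 < (ar1 ++ ar2).count x := List.count_pos_iff.mpr hx
  rw [Bool.eq_iff_iff]
  simp only [Bool.not_eq_eq_eq_not, Bool.not_true, beq_iff_eq,
    ← Bool.not_eq_true, set_contains_iff, hd]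
  constructor
  · intro h
    have : ¬ 2 ≤ (ar1 ++ ar2).count x := fun h2 => h (Or.inr (Or.inr h2))
    omega
  · intro h
    rintro (hc | ⟨hs, _⟩ | hc)
    · exact hempty hc
    · exact hempty hs
    · omega

-- ===== VERDICT (by name: the statement is the Claim_ definition above) =====
theorem find_mismatch_btw_2_lists_spec : Claim_equal_find_mismatch_btw_2_lists := by
  intro ar1 ar2 _
  unfold Spec_find_mismatch_btw_2_lists
  rw [portA_eq_canonical, portB_eq_canonical]
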